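-- pv_equiv track=rewrite | github.com/qazedhq/qa-z | scripts/alpha_release_gate_evidence.py | release_evidence_consistency_next_actions
-- ===== SOURCE A (Python) =====
-- from typing import Sequence
--
-- def release_evidence_consistency_next_actions(errors: Sequence[str]) -> list[str]:
--     """Return deterministic repair guidance for release evidence mismatches."""
--     actions: list[str] = []
--     if any(error.startswith("benchmark snapshot mismatch") for error in errors):
--         actions.append(
--             "Rerun the alpha release gate and inspect `python -m qa_z benchmark "
--             "--json`; publish only after benchmark counters and snapshot agree."
--         )
--     if any(
--         error.startswith("worktree generated artifact split mismatch")
--         for error in errors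
--     ):
--         actions.append(
--             "Rerun `python scripts/worktree_commit_plan.py --include-ignored "
--             "--json` and the alpha release gate; publish only after generated "
--             "artifact totals and split counts agree."
--         )
--     if any(
--         error.startswith("worktree generated artifact policy split mismatch")
--         for error in errors
--     ):
--         actions.append(
--             "Rerun `python scripts/worktree_commit_plan.py --include-ignored "
--             "--json` and the alpha release gate; publish only after generated "
--             "artifact totals and policy-bucket counts agree."
--         )
--     if any(error.startswith("worktree patch-add group mismatch") for error in errors):
--         actions.append(
--             "Rerun `python scripts/worktree_commit_plan.py --summary-only "
--             "--json` and the alpha release gate; publish only after shared "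
--             "patch-add group counts agree."
--         )
--     if any(error.startswith("preflight carried probe freshness") for error in errors):
--         actions.append(
--             "Rerun `python scripts/alpha_release_preflight.py --skip-remote "
--             "--output <path> --json` or the alpha release gate so carried "
--             "probe basis, freshness, and age fields come from one consistent "
--             "preflight artifact."
--         )
--     if any(
--         error.startswith("preflight current probe freshness mismatch")
--         for error in errors
--     ):
--         actions.append(
--             "Rerun remote preflight or the alpha release gate so the current "
--             "probe freshness fields are regenerated from one live preflight run."
--         )
--     return actions
-- ===== SOURCE B (Python) =====
-- _GUIDANCE = [
--     (
--         "benchmark snapshot mismatch",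
--         "Rerun the alpha release gate and inspect `python -m qa_z benchmark "
--         "--json`; publish only after benchmark counters and snapshot agree.",
--     ),
--     (
--         "worktree generated artifact split mismatch",
--         "Rerun `python scripts/worktree_commit_plan.py --include-ignored "
--         "--json` and the alpha release gate; publish only after generated "
--         "artifact totals and split counts agree.",
--     ),
--     (
--         "worktree generated artifact policy split mismatch",
--         "Rerun `python scripts/worktree_commit_plan.py --include-ignored "
--         "--json` and the alpha release gate; publish only after generated "
--         "artifact totals and policy-bucket counts agree.",
--     ),
--     (
--         "worktree patch-add group mismatch",
--         "Rerun `python scripts/worktree_commit_plan.py --summary-only "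
--         "--json` and the alpha release gate; publish only after shared "
--         "patch-add group counts agree.",
--     ),
--     (
--         "preflight carried probe freshness",
--         "Rerun `python scripts/alpha_release_preflight.py --skip-remote "
--         "--output <path> --json` or the alpha release gate so carried "
--         "probe basis, freshness, and age fields come from one consistent "
--         "preflight artifact.",
--     ),
--     (
--         "preflight current probe freshness mismatch",
--         "Rerun remote preflight or the alpha release gate so the current "
--         "probe freshness fields are regenerated from one live preflight run.",
--     ),
-- ]
--
-- # The distinct prefix lengths that ever matter: an error can only match a
-- # recognised prefix via one of these slice lengths.
-- _LENGTHS = sorted({len(prefix) for prefix, _ in _GUIDANCE})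
--
--
-- def release_evidence_consistency_next_actions(errors):
--     """Hash-index approach: collect every error's slices at the relevant
--     lengths into one set, then emit each action whose exact prefix string is
--     in that set.  No error is ever compared against a prefix."""
--     seen = set()
--     for error in errors:
--         for length in _LENGTHS:
--             seen.add(error[:length])
--     return [action for prefix, action in _GUIDANCE if prefix in seen]
-- ===== Notes on version B (the rewrite author's own statement) =====
-- stated objective: alternative
-- what changed: Replaces A's six any()-scans that compare every error against every prefix with a hash-index: one pass slices each error at the four distinct prefix lengths into a set of strings, then each action is emitted iff its exact prefix string is a member of that set, so no error is ever prefix-compared against a pattern.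
import Mathlib
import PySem

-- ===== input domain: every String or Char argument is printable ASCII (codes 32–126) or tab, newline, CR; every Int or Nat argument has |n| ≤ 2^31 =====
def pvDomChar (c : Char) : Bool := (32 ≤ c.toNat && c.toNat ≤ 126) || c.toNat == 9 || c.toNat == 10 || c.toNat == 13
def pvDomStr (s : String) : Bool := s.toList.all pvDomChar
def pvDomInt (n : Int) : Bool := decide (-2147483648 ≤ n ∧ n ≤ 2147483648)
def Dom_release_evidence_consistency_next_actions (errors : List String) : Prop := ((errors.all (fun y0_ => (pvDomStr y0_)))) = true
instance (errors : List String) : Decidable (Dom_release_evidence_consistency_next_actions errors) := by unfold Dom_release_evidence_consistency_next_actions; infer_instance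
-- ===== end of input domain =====

-- B replaces A's six any()-scans (each comparing every error against a prefix) by a
-- hash-index: one pass collecting each error's slices at the four relevant lengths
-- into a set, then six set-membership lookups of the exact prefix strings
-- (objective: alternative algorithm, no prefix comparison per error).

-- ===== PORT A =====
-- the six prefix / action string literals (both Pythons spell them out identically)
def pvPre0 : String := "benchmark snapshot mismatch"
def pvPre1 : String := "worktree generated artifact split mismatch"
def pvPre2 : String := "worktree generated artifact policy split mismatch"
def pvPre3 : String := "worktree patch-add group mismatch"
def pvPre4 : String := "preflight carried probe freshness"
def pvPre5 : String := "preflight current probe freshness mismatch"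
def pvAct0 : String := "Rerun the alpha release gate and inspect `python -m qa_z benchmark --json`; publish only after benchmark counters and snapshot agree."
def pvAct1 : String := "Rerun `python scripts/worktree_commit_plan.py --include-ignored --json` and the alpha release gate; publish only after generated artifact totals and split counts agree."
def pvAct2 : String := "Rerun `python scripts/worktree_commit_plan.py --include-ignored --json` and the alpha release gate; publish only after generated artifact totals and policy-bucket counts agree."
def pvAct3 : String := "Rerun `python scripts/worktree_commit_plan.py --summary-only --json` and the alpha release gate; publish only after shared patch-add group counts agree."
def pvAct4 : String := "Rerun `python scripts/alpha_release_preflight.py --skip-remote --output <path> --json` or the alpha release gate so carried probe basis, freshness, and age fields come from one consistent preflight artifact."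
def pvAct5 : String := "Rerun remote preflight or the alpha release gate so the current probe freshness fields are regenerated from one live preflight run."

def release_evidence_consistency_next_actions (errors : List String) : List String :=
  let actions : List String := []
  let actions := if errors.any (fun error => PySem.Str.startswith error pvPre0) then actions ++ [pvAct0] else actions
  let actions := if errors.any (fun error => PySem.Str.startswith error pvPre1) then actions ++ [pvAct1] else actions
  let actions := if errors.any (fun error => PySem.Str.startswith error pvPre2) then actions ++ [pvAct2] else actions
  let actions := if errors.any (fun error => PySem.Str.startswith error pvPre3) then actions ++ [pvAct3] else actions
  let actions := if errors.any (fun error => PySem.Str.startswith error pvPre4) then actions ++ [pvAct4] else actions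
  let actions := if errors.any (fun error => PySem.Str.startswith error pvPre5) then actions ++ [pvAct5] else actions
  actions

-- ===== PORT B =====
-- _GUIDANCE of Source B
def pvTable : List (String × String) :=
  [(pvPre0, pvAct0), (pvPre1, pvAct1), (pvPre2, pvAct2),
   (pvPre3, pvAct3), (pvPre4, pvAct4), (pvPre5, pvAct5)]

-- _LENGTHS = sorted({len(prefix) for prefix, _ in _GUIDANCE})
def pvLengths : List Int :=
  PySem.List.sorted (PySem.Set.ofList (pvTable.map (fun pa => (PySem.Str.len pa.1 : Int)))) (fun x => x) false

def release_evidence_consistency_next_actions_alt (errors : List String) : List String :=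
  let seen : PySem.Set String :=
    errors.foldl
      (fun seen error =>
        pvLengths.foldl
          (fun seen length => PySem.Set.add seen (PySem.Str.slice error none (some length)))
          seen)
      PySem.Set.empty
  (pvTable.filter (fun pa => PySem.Set.contains seen pa.1)).map (fun pa => pa.2)

-- ===== PRECONDITION & SPEC =====
def Spec_release_evidence_consistency_next_actions (errors : List String) (out : List String) : Prop := out = release_evidence_consistency_next_actions_alt errors
instance (errors : List String) (out : List String) : Decidable (Spec_release_evidence_consistency_next_actions errors out) := by unfold Spec_release_evidence_consistency_next_actions; infer_instance

-- ===== CLAIM (what is proved, stated in full; the proofs are below) =====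
def Claim_equal_release_evidence_consistency_next_actions : Prop := ∀ (errors : List String), Dom_release_evidence_consistency_next_actions errors → Spec_release_evidence_consistency_next_actions errors (release_evidence_consistency_next_actions errors)

-- ===== LEMMAS AND PROOFS =====

theorem pvLengths_eq : pvLengths = [27, 33, 42, 49] := by decide

-- membership after a sequence of Set.add
theorem pv_contains_add {α : Type} [BEq α] [LawfulBEq α] (s : PySem.Set α) (x y : α) :
    PySem.Set.contains (PySem.Set.add s x) y = (PySem.Set.contains s y || x == y) := by
  simp only [PySem.Set.add, PySem.Set.contains_eq_listContains]
  split_ifs with h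
  · rcases Bool.eq_false_or_eq_true (x == y) with hb | hb
    · have hxy : x = y := beq_iff_eq.mp hb
      subst hxy
      simp [List.contains_eq_mem] at h ⊢
      exact h
    · simp [hb]
  · rcases Bool.eq_false_or_eq_true (x == y) with hb | hb
    · have hxy : x = y := beq_iff_eq.mp hb
      subst hxy
      simp [List.contains_eq_mem]
    · have hxy : x ≠ y := by simpa using hb
      simp [hb, List.contains_eq_mem, List.mem_append, Ne.symm hxy]

theorem pv_contains_foldl_add {α : Type} [BEq α] [LawfulBEq α] (f : Int → α) (Ls : List Int)
    (t : PySem.Set α) (p : α) :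
    PySem.Set.contains (Ls.foldl (fun s L => PySem.Set.add s (f L)) t) p
      = (PySem.Set.contains t p || Ls.any (fun L => f L == p)) := by
  induction Ls generalizing t with
  | nil => simp
  | cons L r ih => simp only [List.foldl_cons, List.any_cons, ih, pv_contains_add, Bool.or_assoc]

-- membership in the seen-set accumulated by B's single slicing pass
theorem pv_seen_contains (errors : List String) (s : PySem.Set String) (p : String) :
    PySem.Set.contains
      (errors.foldl
        (fun seen error =>
          ([27, 33, 42, 49] : List Int).foldl
            (fun seen length => PySem.Set.add seen (PySem.Str.slice error none (some length)))
            seen)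
        s) p
      = (PySem.Set.contains s p ||
         errors.any (fun e =>
           ([27, 33, 42, 49] : List Int).any (fun L => PySem.Str.slice e none (some L) == p))) := by
  induction errors generalizing s with
  | nil => simp
  | cons e rest ih =>
      rw [List.foldl_cons, ih]
      simp only [pv_contains_foldl_add, List.any_cons, Bool.or_assoc]

-- a slice of e equal to p means e starts with p
theorem pv_slice_imp (e p : String) (L : Int) (hL : 0 ≤ L)
    (h : PySem.Str.slice e none (some L) = p) : PySem.Str.startswith e p = true := by
  have ht : p.toList = e.toList.take L.toNat := by
    rw [← h]
    simp only [PySem.Str.toList_slice, PySem.Chars.slice_eq_listSlice, PySem.List.slice_to _ hL]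
  simp only [PySem.Str.startswith_eq, PySem.Chars.startswith_iff, ht]
  exact List.take_prefix _ _

-- e starting with p means the slice at |p| is exactly p
theorem pv_startswith_slice (e p : String)
    (h : PySem.Str.startswith e p = true) :
    PySem.Str.slice e none (some (p.toList.length : Int)) = p := by
  simp only [PySem.Str.startswith_eq, PySem.Chars.startswith_iff] at h
  apply String.ext
  rw [PySem.Str.toList_slice]
  simp only [PySem.Chars.slice_eq_listSlice, PySem.List.slice_to_natCast]
  exact (List.prefix_iff_eq_take.mp h).symm

-- per-error: some relevant-length slice equals p  ⟺  e startswith p (for p of a relevant length)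
theorem pv_match (e p : String)
    (hmem : ((p.toList.length : Int)) ∈ ([27, 33, 42, 49] : List Int)) :
    (([27, 33, 42, 49] : List Int).any (fun L => PySem.Str.slice e none (some L) == p))
      = PySem.Str.startswith e p := by
  by_cases h : PySem.Str.startswith e p = true
  · rw [h]
    exact List.any_eq_true.mpr ⟨_, hmem, by rw [pv_startswith_slice e p h]; exact beq_self_eq_true p⟩
  · rw [Bool.not_eq_true] at h
    rw [h]
    refine List.any_eq_false.mpr ?_
    intro L hL hbeq
    rw [beq_iff_eq] at hbeq
    have h0 : (0 : Int) ≤ L := by fin_cases hL <;> norm_num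
    have := pv_slice_imp e p L h0 hbeq
    rw [this] at h
    exact Bool.true_eq_false ▸ h

-- B's fixed-order emission pass, with the seen-set abstracted
theorem pv_emit (seen : PySem.Set String) :
    ((pvTable.filter (fun pa => PySem.Set.contains seen pa.1)).map (fun pa => pa.2))
    = ((if PySem.Set.contains seen pvPre0 then [pvAct0] else []) ++
       (if PySem.Set.contains seen pvPre1 then [pvAct1] else []) ++
       (if PySem.Set.contains seen pvPre2 then [pvAct2] else []) ++
       (if PySem.Set.contains seen pvPre3 then [pvAct3] else []) ++
       (if PySem.Set.contains seen pvPre4 then [pvAct4] else []) ++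
       (if PySem.Set.contains seen pvPre5 then [pvAct5] else [])) := by
  simp only [pvTable, List.filter_cons, List.filter_nil]
  split_ifs <;> simp_all

-- ===== VERDICT (by name: the statement is the Claim_ definition above) =====
set_option maxHeartbeats 1000000 in
theorem release_evidence_consistency_next_actions_spec : Claim_equal_release_evidence_consistency_next_actions := by
  intro errors _
  unfold Spec_release_evidence_consistency_next_actions
  simp only [release_evidence_consistency_next_actions, release_evidence_consistency_next_actions_alt,
    pvLengths_eq]
  rw [pv_emit]
  simp only [pv_seen_contains]
  simp only [PySem.Set.empty, PySem.Set.contains_eq_listContains, List.contains_nil, Bool.false_or]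
  have h0 := fun e => pv_match e pvPre0 (by decide)
  have h1 := fun e => pv_match e pvPre1 (by decide)
  have h2 := fun e => pv_match e pvPre2 (by decide)
  have h3 := fun e => pv_match e pvPre3 (by decide)
  have h4 := fun e => pv_match e pvPre4 (by decide)
  have h5 := fun e => pv_match e pvPre5 (by decide)
  simp only [h0, h1, h2, h3, h4, h5]
  split_ifs <;> rfl
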